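-- pv_equiv track=rewrite | github.com/MrBrantCode/unitest_baseline | mut_generate/mist_train_cf/cf_71375/solution.py | solution
-- ===== SOURCE A (Python) =====
-- def solution(n):
--     if n < 3:
--         return -1
--
--     fib = [1, 1]
--     for i in range(2, n):
--         fib.append(fib[i-1] + fib[i-2])
--
--     product = 1
--     for i in range(2, n, 3):
--         product *= fib[i]
--
--     return product
-- ===== SOURCE B (Python) =====
-- def solution(n):
--     if n < 3:
--         return -1
--     product = 1
--     a, b = 1, 1  # a = fib[i-2], b = fib[i-1] at the top of each iteration
--     for i in range(2, n):
--         a, b = b, a + b  # now b = fib[i]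
--         if i % 3 == 2:
--             product *= b
--     return product
-- ===== Notes on version B (the rewrite author's own statement) =====
-- stated objective: simpler
-- what changed: B computes Fibonacci with two rolling variables and multiplies the accumulator when i % 3 == 2 in a single pass, instead of materialising the whole Fibonacci list and then doing a second strided pass over it; O(1) extra storage instead of an O(n) array.
import Mathlib
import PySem

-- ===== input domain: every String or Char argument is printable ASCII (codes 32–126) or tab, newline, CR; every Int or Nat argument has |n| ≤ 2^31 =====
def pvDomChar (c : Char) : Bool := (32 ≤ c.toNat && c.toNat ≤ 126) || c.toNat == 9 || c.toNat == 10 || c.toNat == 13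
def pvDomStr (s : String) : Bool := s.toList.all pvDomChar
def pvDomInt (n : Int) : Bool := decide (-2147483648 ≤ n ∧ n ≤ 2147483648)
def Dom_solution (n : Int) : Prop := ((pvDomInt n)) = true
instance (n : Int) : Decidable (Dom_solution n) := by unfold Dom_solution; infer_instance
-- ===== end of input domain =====

-- B: single rolling-variable pass that multiplies at i % 3 == 2, instead of A building the whole Fibonacci list and doing a second strided pass (objective: simpler).


-- ===== PORT A =====
def solution (n : Int) : Int :=
  if n < 3 then -1
  else
    let fib := (PySem.List.pyRange 2 n 1).foldl
      (fun fib i => fib ++ [PySem.List.pyGetD fib (i - 1) 0 + PySem.List.pyGetD fib (i - 2) 0])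
      ([1, 1] : List Int)
    (PySem.List.pyRange 2 n 3).foldl (fun product i => product * PySem.List.pyGetD fib i 0) 1

-- ===== PORT B =====
-- state is (product, a, b); 'a, b = b, a + b' then 'if i % 3 == 2: product *= b'
def solution_alt (n : Int) : Int :=
  if n < 3 then -1
  else
    ((PySem.List.pyRange 2 n 1).foldl
      (fun (s : Int × Int × Int) i =>
        let b' := s.2.1 + s.2.2
        (if i % 3 = 2 then s.1 * b' else s.1, s.2.2, b'))
      (1, 1, 1)).1

-- ===== PRECONDITION & SPEC =====
def Spec_solution (n : Int) (out : Int) : Prop := out = solution_alt n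
instance (n : Int) (out : Int) : Decidable (Spec_solution n out) := by unfold Spec_solution; infer_instance

-- ===== CLAIM (what is proved, stated in full; the proofs are below) =====
def Claim_equal_solution : Prop := ∀ (n : Int), Dom_solution n → Spec_solution n (solution n)

-- ===== LEMMAS AND PROOFS =====

-- mathematical Fibonacci with fib 0 = fib 1 = 1 (proof helper only)
def fibm : Nat → Int
  | 0 => 1
  | 1 => 1
  | (k + 2) => fibm k + fibm (k + 1)

-- product of fibm j over j ∈ [i, i+K) with j % 3 = 2
def W : Nat → Nat → Int
  | 0, _ => 1
  | (K + 1), i => (if i % 3 = 2 then fibm i else 1) * W K (i + 1)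

theorem fibm_rec {i : Nat} (h : 2 ≤ i) : fibm i = fibm (i - 2) + fibm (i - 1) := by
  obtain ⟨k, rfl⟩ : ∃ k, i = k + 2 := ⟨i - 2, by omega⟩
  simp [fibm]

-- A's first loop builds the list of the first t+2 Fibonacci numbers
theorem fib_build (t : Nat) :
    (PySem.List.pyRange 2 (2 + (t : Int)) 1).foldl
      (fun fib i => fib ++ [PySem.List.pyGetD fib (i - 1) 0 + PySem.List.pyGetD fib (i - 2) 0])
      ([1, 1] : List Int)
    = (List.range (t + 2)).map fibm := by
  induction t with
  | zero =>
    rw [show ((2 : Int) + ((0 : Nat) : Int) = 2) by norm_num, PySem.List.pyRange_one_eq_nil le_rfl]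
    simp [List.range_succ, fibm]
  | succ t ih =>
    rw [show ((2 : Int) + ((t + 1 : Nat) : Int) = (2 + (t : Int)) + 1) by push_cast; ring,
        PySem.List.pyRange_one_succ_right (by omega), List.foldl_append, ih]
    have h1 : PySem.List.pyGetD ((List.range (t + 2)).map fibm) ((2 + (t : Int)) - 1) 0
        = fibm (t + 1) := by
      rw [show ((2 + (t : Int)) - 1 = ((t + 1 : Nat) : Int)) by push_cast; ring,
          PySem.List.pyGetD_of_nonneg _ _ (by omega)]
      simp only [Int.toNat_natCast]
      exact PySem.List.getD_map_range fibm _ _ _ (by omega)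
    have h2 : PySem.List.pyGetD ((List.range (t + 2)).map fibm) ((2 + (t : Int)) - 2) 0
        = fibm t := by
      rw [show ((2 + (t : Int)) - 2 = ((t : Nat) : Int)) by ring,
          PySem.List.pyGetD_of_nonneg _ _ (by omega)]
      simp only [Int.toNat_natCast]
      exact PySem.List.getD_map_range fibm _ _ _ (by omega)
    simp only [List.foldl_cons, List.foldl_nil, h1, h2]
    rw [show fibm (t + 1) + fibm t = fibm (t + 2) from by
          rw [show fibm (t + 2) = fibm t + fibm (t + 1) from rfl]; ring,
        show t + 1 + 2 = (t + 2) + 1 by ring]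
    simp [List.range_succ]

-- fold of multiplication = 'init *' product of the mapped list
theorem foldl_mul_eq_prod (m : Nat) (f : Nat → Int) (p : Int) :
    (List.range m).foldl (fun p k => p * f k) p = p * ((List.range m).map f).prod := by
  induction m generalizing p with
  | zero => simp
  | succ m ih => rw [List.range_succ, List.foldl_append, List.map_append]; simp [ih]; ring

-- W at an index ≡ 2 (mod 3) is the product over the arithmetic progression i, i+3, …
theorem W_eq_prod (K : Nat) : ∀ i : Nat, i % 3 = 2 →
    W K i = ((List.range ((K + 2) / 3)).map (fun k => fibm (i + 3 * k))).prod := by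
  induction K using Nat.strong_induction_on with
  | _ K ih =>
    match K with
    | 0 => intro i hi; simp [W]
    | 1 =>
      intro i hi
      rw [show (1 + 2) / 3 = 1 by norm_num]
      simp [W, hi, List.range_succ]
    | 2 =>
      intro i hi
      rw [show (2 + 2) / 3 = 1 by norm_num]
      simp [W, hi, List.range_succ, show (i + 1) % 3 = 0 by omega]
    | (K + 3) =>
      intro i hi
      have h1 : (i + 1) % 3 = 0 := by omega
      have h2 : (i + 2) % 3 = 1 := by omega
      have hK : W K (i + 3) = ((List.range ((K + 2) / 3)).map (fun k => fibm (i + 3 + 3 * k))).prod :=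
        ih K (by omega) (i + 3) (by omega)
      have hsplit : (K + 3 + 2) / 3 = (K + 2) / 3 + 1 := by omega
      have hmap : List.map ((fun k => fibm (i + 3 * k)) ∘ (fun k => k + 1)) (List.range ((K + 2) / 3))
          = List.map (fun k => fibm (i + 3 + 3 * k)) (List.range ((K + 2) / 3)) := by
        refine List.map_congr_left (fun a _ => ?_)
        show fibm (i + 3 * (a + 1)) = fibm (i + 3 + 3 * a)
        congr 1; omega
      calc W (K + 3) i = fibm i * W K (i + 3) := by
            simp [W, hi, h1, h2, show i + 1 + 1 = i + 2 by ring,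
                  show i + 2 + 1 = i + 3 by ring]
        _ = ((List.range ((K + 3 + 2) / 3)).map (fun k => fibm (i + 3 * k))).prod := by
            rw [hK, hsplit, List.range_succ_eq_map, List.map_cons, List.prod_cons, List.map_map, hmap]
            norm_num

-- B's loop invariant
theorem B_inv (K : Nat) : ∀ (i : Nat) (p : Int), 2 ≤ i →
    ((PySem.List.pyRange (i : Int) ((i : Int) + (K : Int)) 1).foldl
      (fun (s : Int × Int × Int) j =>
        let b' := s.2.1 + s.2.2
        (if j % 3 = 2 then s.1 * b' else s.1, s.2.2, b'))
      (p, fibm (i - 2), fibm (i - 1))).1 = p * W K i := by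
  induction K with
  | zero =>
    intro i p hi
    rw [show ((i : Int) + ((0 : Nat) : Int) = (i : Int)) by norm_num,
        PySem.List.pyRange_one_eq_nil le_rfl]
    simp [W]
  | succ K ih =>
    intro i p hi
    rw [PySem.List.pyRange_one_cons (by push_cast; omega), List.foldl_cons]
    have hb : fibm (i - 2) + fibm (i - 1) = fibm i := (fibm_rec hi).symm
    have hiff : ((i : Int) % 3 = 2) ↔ (i % 3 = 2) := by omega
    dsimp only at ih ⊢
    rw [hb,
        show fibm (i - 1) = fibm (i + 1 - 2) from rfl,
        show fibm i = fibm (i + 1 - 1) from rfl,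
        show (i : Int) + 1 = ((i + 1 : Nat) : Int) by push_cast; ring,
        show (i : Int) + ((K + 1 : Nat) : Int) = ((i + 1 : Nat) : Int) + ((K : Nat) : Int) by push_cast; ring,
        ih (i + 1) _ (by omega),
        show i + 1 - 1 = i by omega]
    by_cases h : i % 3 = 2
    · rw [show W (K + 1) i = (if i % 3 = 2 then fibm i else 1) * W K (i + 1) from rfl,
          if_pos (hiff.mpr h), if_pos h]
      ring
    · rw [show W (K + 1) i = (if i % 3 = 2 then fibm i else 1) * W K (i + 1) from rfl,
          if_neg (fun hc => h (hiff.mp hc)), if_neg h]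
      ring

-- ===== VERDICT (by name: the statement is the Claim_ definition above) =====
theorem solution_spec : Claim_equal_solution := by
  intro n _
  unfold Spec_solution solution solution_alt
  by_cases hn : n < 3
  · rw [if_pos hn, if_pos hn]
  · rw [if_neg hn, if_neg hn]
    set K : Nat := (n - 2).toNat with hKdef
    set m : Nat := (n / 3).toNat with hmdef
    have hfib : (PySem.List.pyRange 2 n 1).foldl
        (fun fib i => fib ++ [PySem.List.pyGetD fib (i - 1) 0 + PySem.List.pyGetD fib (i - 2) 0])
        ([1, 1] : List Int) = (List.range (K + 2)).map fibm := by
      rw [show n = 2 + (K : Int) by omega]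
      exact fib_build K
    have hr3 : PySem.List.pyRange 2 n 3 = (List.range m).map (fun k : Nat => (2 : Int) + 3 * (k : Int)) := by
      rw [PySem.List.pyRange_of_pos 2 n (by norm_num), if_pos (by omega),
          show n - 2 + 3 - 1 = n by ring]
    have hA : (PySem.List.pyRange 2 n 3).foldl
        (fun product i => product * PySem.List.pyGetD ((List.range (K + 2)).map fibm) i 0) 1
        = ((List.range m).map (fun k => fibm (2 + 3 * k))).prod := by
      rw [hr3, List.foldl_map,
          PySem.List.foldl_congr_mem _ _ (fun p k => p * fibm (2 + 3 * k)) 1 ?_,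
          foldl_mul_eq_prod, one_mul]
      intro acc k hk
      rw [List.mem_range] at hk
      have hlt : 2 + 3 * k < K + 2 := by omega
      rw [show (2 : Int) + 3 * (k : Int) = ((2 + 3 * k : Nat) : Int) by push_cast; ring,
          PySem.List.pyGetD_of_nonneg _ _ (by omega)]
      simp only [Int.toNat_natCast]
      rw [PySem.List.getD_map_range fibm _ _ _ hlt]
    have hB : ((PySem.List.pyRange 2 n 1).foldl
        (fun (s : Int × Int × Int) i =>
          let b' := s.2.1 + s.2.2
          (if i % 3 = 2 then s.1 * b' else s.1, s.2.2, b')) (1, 1, 1)).1 = 1 * W K 2 := by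
      have h := B_inv K 2 1 le_rfl
      rw [show (((2 : Nat) : Int)) = (2 : Int) by norm_num,
          show (2 : Int) + (K : Int) = n by omega,
          show fibm (2 - 2) = 1 from rfl, show fibm (2 - 1) = 1 from rfl] at h
      exact h
    rw [hfib, hA, hB, one_mul, W_eq_prod K 2 (by norm_num),
        show (K + 2) / 3 = m by omega]
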